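-- pv_equiv track=rewrite | github.com/zyfone/DPA | lib/model/da_faster_rcnn/openset_weight.py | remove_consecutive
-- ===== SOURCE A (Python) =====
-- def remove_consecutive(lst):
--     result = []
--     i = 0
--     while i < len(lst):
--         start = lst[i]
--         end = start
--         while i < len(lst) - 1 and lst[i + 1] == end + 1:
--             i += 1
--             end = lst[i]
--         if start == end:
--             result.append(start)
--         i += 1
--     return result
-- ===== SOURCE B (Python) =====
-- def remove_consecutive(lst):
--     groups = []
--     for x in lst:
--         if groups and x == groups[-1][-1] + 1:
--             groups[-1].append(x)
--         else:
--             groups.append([x])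
--     return [g[0] for g in groups if len(g) == 1]
-- ===== Notes on version B (the rewrite author's own statement) =====
-- stated objective: alternative
-- what changed: Replaces A's index-based nested while loops with a single fold that materializes the consecutive runs as explicit groups, followed by a filter that keeps the element of each singleton group.
import Mathlib
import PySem

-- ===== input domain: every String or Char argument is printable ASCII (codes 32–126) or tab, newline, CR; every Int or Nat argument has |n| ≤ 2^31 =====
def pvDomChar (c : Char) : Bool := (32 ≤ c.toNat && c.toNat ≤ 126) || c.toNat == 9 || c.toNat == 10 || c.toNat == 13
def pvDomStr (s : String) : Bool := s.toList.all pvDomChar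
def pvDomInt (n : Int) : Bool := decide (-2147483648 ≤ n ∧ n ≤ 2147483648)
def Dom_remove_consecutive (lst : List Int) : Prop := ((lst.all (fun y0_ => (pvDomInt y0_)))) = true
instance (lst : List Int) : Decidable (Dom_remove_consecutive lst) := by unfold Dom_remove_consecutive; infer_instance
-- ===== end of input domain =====

-- B builds the consecutive runs explicitly with one fold, then filters the singleton groups;
-- A scans with an index and a nested inner while loop. Same values, different decomposition.

-- ===== PORT A =====
-- inner while loop of A: starting from current end `e`, consume successive `e+1` elements;
-- returns (final end, remaining list after the run)
def skipA (e : Int) : List Int → Int × List Int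
  | [] => (e, [])
  | y :: t => if y = e + 1 then skipA y t else (e, y :: t)

theorem skipA_len_le (e : Int) (l : List Int) : (skipA e l).2.length ≤ l.length := by
  induction l generalizing e with
  | nil => simp [skipA]
  | cons y t ih =>
    simp only [skipA]
    split
    · exact le_trans (ih y) (Nat.le_succ _)
    · simp

-- outer while loop of A over the remaining suffix
def remove_consecutive (lst : List Int) : List Int :=
  match lst with
  | [] => []
  | x :: rest =>
    let p := skipA x rest
    if x = p.1 then x :: remove_consecutive p.2 else remove_consecutive p.2
termination_by lst.length
decreasing_by
  all_goals simpa using Nat.lt_succ_of_le (skipA_len_le x rest)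

-- ===== PORT B =====
-- fold state: list of groups, most recent group first, each group stored newest-element-first
def stepB (gs : List (List Int)) (x : Int) : List (List Int) :=
  match gs with
  | (h :: t) :: gs' => if x = h + 1 then (x :: h :: t) :: gs' else [x] :: (h :: t) :: gs'
  | [] :: gs' => [x] :: [] :: gs'   -- unreachable: groups are never empty
  | [] => [[x]]

def remove_consecutive_alt (lst : List Int) : List Int :=
  let gs := lst.foldl stepB []
  (((gs.reverse.map List.reverse).filter (fun g => g.length == 1)).map (fun g => g.headD 0))

-- ===== PRECONDITION & SPEC =====
def Spec_remove_consecutive (lst : List Int) (out : List Int) : Prop := out = remove_consecutive_alt lst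
instance (lst : List Int) (out : List Int) : Decidable (Spec_remove_consecutive lst out) := by unfold Spec_remove_consecutive; infer_instance

-- ===== CLAIM (what is proved, stated in full; the proofs are below) =====
def Claim_equal_remove_consecutive : Prop := ∀ (lst : List Int), Dom_remove_consecutive lst → Spec_remove_consecutive lst (remove_consecutive lst)

-- ===== LEMMAS AND PROOFS =====

-- extract B's answer from a group state
def Bres (gs : List (List Int)) : List Int :=
  (((gs.reverse.map List.reverse).filter (fun g => g.length == 1)).map (fun g => g.headD 0))

theorem Bres_cons (g : List Int) (gs : List (List Int)) :
    Bres (g :: gs) = Bres gs ++ (if g.length = 1 then [g.reverse.headD 0] else []) := by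
  simp only [Bres, List.reverse_cons, List.map_append, List.filter_append, List.map_append,
    List.map_cons, List.map_nil, List.filter_cons]
  split_ifs with h1 h2 h3
  · simp
  · simp only [List.length_reverse, beq_iff_eq] at *; omega
  · simp only [List.length_reverse, beq_iff_eq] at *; omega
  · simp

-- the common recursive description: processing the rest of the input while the current group
-- ends with `e` and is a singleton iff `single`
def runB (e : Int) (single : Bool) : List Int → List Int
  | [] => if single then [e] else []
  | x :: xs =>
    if x = e + 1 then runB x false xs
    else (if single then [e] else []) ++ runB x true xs

theorem foldl_stepB_runB (xs : List Int) (e : Int) (t : List Int) (gs : List (List Int)) :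
    Bres (List.foldl stepB ((e :: t) :: gs) xs) = Bres gs ++ runB e t.isEmpty xs := by
  induction xs generalizing e t gs with
  | nil =>
    simp only [List.foldl_nil, runB, Bres_cons]
    cases t <;> simp
  | cons x xs ih =>
    simp only [List.foldl_cons, stepB, runB]
    split
    · rw [ih]; simp
    · rw [ih x [] ((e :: t) :: gs), Bres_cons]
      cases t <;> simp

theorem rc_nil : remove_consecutive [] = [] := by
  rw [remove_consecutive]

theorem rc_cons (x : Int) (xs : List Int) :
    remove_consecutive (x :: xs) =
      if x = (skipA x xs).1 then x :: remove_consecutive (skipA x xs).2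
      else remove_consecutive (skipA x xs).2 := by
  rw [remove_consecutive]

theorem skipA_fst_ge (e : Int) (l : List Int) : e ≤ (skipA e l).1 := by
  induction l generalizing e with
  | nil => simp [skipA]
  | cons y t ih =>
    simp only [skipA]
    split_ifs with hy
    · have := ih y; omega
    · simp

theorem runB_skipA (xs : List Int) (e : Int) (single : Bool) :
    runB e single xs =
      (if single ∧ e = (skipA e xs).1 then [e] else []) ++ remove_consecutive (skipA e xs).2 := by
  induction xs generalizing e single with
  | nil => cases single <;> simp [runB, skipA, rc_nil]
  | cons x xs ih =>
    by_cases hx : x = e + 1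
    · have h1 : ¬ (single = true ∧ e = (skipA x xs).1) := by
        rintro ⟨_, he⟩
        have := skipA_fst_ge x xs
        omega
      simp only [runB, skipA]
      simp only [if_pos hx]
      rw [ih x false]
      simp [h1]
    · simp only [runB, skipA]
      simp only [if_neg hx]
      rw [ih x true, rc_cons]
      rcases hsk : skipA x xs with ⟨f, r⟩
      by_cases hx2 : x = f
      · cases single <;> simp [hx2]
      · cases single <;> simp [hx2]

theorem A_eq_B (lst : List Int) : remove_consecutive lst = remove_consecutive_alt lst := by
  cases lst with
  | nil => rw [rc_nil]; rfl
  | cons x xs =>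
    have hB : remove_consecutive_alt (x :: xs) = Bres (List.foldl stepB [[x]] xs) := rfl
    rw [hB, foldl_stepB_runB xs x [] ([] : List (List Int)), runB_skipA, rc_cons]
    simp only [List.isEmpty_nil, Bres, List.reverse_nil, List.map_nil, List.filter_nil,
      List.nil_append, true_and]
    split <;> simp

-- ===== VERDICT (by name: the statement is the Claim_ definition above) =====
theorem remove_consecutive_spec : Claim_equal_remove_consecutive := by
  intro lst _
  exact A_eq_B lst
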